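-- pv_equiv track=rewrite | github.com/mesax1/hugo-doug-john-search-agent | src/search_agent/advanced_search.py | taxonomy_tokenizer
-- ===== SOURCE A (Python) =====
-- def taxonomy_tokenizer(text: str) -> list[str]:
--     """Hierarchical tokenizer for category paths like 'Furniture/Living Room/Sofas'.
--
--     Emits one token per prefix level so that a query for 'Furniture' matches
--     every product in that top-level category, while 'Furniture/Living Room'
--     narrows to that sub-category, etc.
--
--     'Furniture/Living Room/Sofas' ->
--         ['Furniture', 'Furniture/Living Room', 'Furniture/Living Room/Sofas']
--     """
--     if not isinstance(text, str) or not text: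
--         return []
--     parts = [p.strip() for p in text.split("/")]
--     tokens = []
--     current = ""
--     for part in parts:
--         current += part
--         tokens.append(current)
--         current += "/"
--     return tokens
-- ===== SOURCE B (Python) =====
-- def taxonomy_tokenizer(text: str) -> list[str]:
--     """Hierarchical tokenizer: one token per prefix level of a '/'-separated path."""
--     if not isinstance(text, str) or not text:
--         return []
--     parts = [p.strip() for p in text.split("/")]
--     return ["/".join(parts[: i + 1]) for i in range(len(parts))]
-- ===== Notes on version B (the rewrite author's own statement) =====
-- stated objective: simpler
-- what changed: B drops A's running-accumulator loop (a 'current' string grown and trailing-separator-patched across iterations) and instead forms each token independently as the slash-join of the first i+1 stripped parts over an index range, maintaining no cross-iteration state.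
import Mathlib
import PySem

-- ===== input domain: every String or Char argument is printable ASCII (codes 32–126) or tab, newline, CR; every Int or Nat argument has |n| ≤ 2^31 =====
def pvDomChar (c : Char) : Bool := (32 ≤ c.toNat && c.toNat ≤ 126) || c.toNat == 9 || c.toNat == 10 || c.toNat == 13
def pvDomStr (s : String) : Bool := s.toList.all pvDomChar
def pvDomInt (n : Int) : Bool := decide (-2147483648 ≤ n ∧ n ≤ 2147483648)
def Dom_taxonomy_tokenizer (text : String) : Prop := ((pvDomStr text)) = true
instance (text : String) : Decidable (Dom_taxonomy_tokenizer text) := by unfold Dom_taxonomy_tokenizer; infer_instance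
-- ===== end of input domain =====

-- B replaces A's running 'current' accumulator loop by forming each token
-- independently as '/'.join(parts[:i+1]) over an index range (simpler decomposition).

-- ===== PORT A =====
-- one iteration of A's loop: append current+part to tokens, then grow current by part+'/'
def pvTkStep (st : List (List Char) × List Char) (part : List Char) :
    List (List Char) × List Char :=
  (st.1 ++ [st.2 ++ part], st.2 ++ part ++ ['/'])

def taxonomy_tokenizer (text : String) : List String :=
  if text = "" then []
  else
    let parts := (PySem.Chars.splitOn text.toList ['/']).map PySem.Chars.strip
    ((parts.foldl pvTkStep ([], [])).1).map String.ofList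

-- ===== PORT B =====
def taxonomy_tokenizer_alt (text : String) : List String :=
  if text = "" then []
  else
    let parts := (PySem.Chars.splitOn text.toList ['/']).map PySem.Chars.strip
    (List.range parts.length).map
      (fun i => String.ofList (PySem.Chars.join ['/'] (parts.take (i + 1))))

-- ===== PRECONDITION & SPEC =====
def Spec_taxonomy_tokenizer (text : String) (out : List String) : Prop := out = taxonomy_tokenizer_alt text
instance (text : String) (out : List String) : Decidable (Spec_taxonomy_tokenizer text out) := by unfold Spec_taxonomy_tokenizer; infer_instance

-- ===== CLAIM (what is proved, stated in full; the proofs are below) =====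
def Claim_equal_taxonomy_tokenizer : Prop := ∀ (text : String), Dom_taxonomy_tokenizer text → Spec_taxonomy_tokenizer text (taxonomy_tokenizer text)

-- ===== LEMMAS AND PROOFS =====

-- A's accumulator fold, started at any (tokens, cur), emits the slice-joins prefixed by cur.
theorem pvFold_eq (parts tokens : List (List Char)) (cur : List Char) :
    (parts.foldl pvTkStep (tokens, cur)).1
      = tokens ++ (List.range parts.length).map
          (fun i => cur ++ PySem.Chars.join ['/'] (parts.take (i + 1))) := by
  induction parts generalizing tokens cur with
  | nil => simp
  | cons p ps ih =>
    rw [List.foldl_cons]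
    show (ps.foldl pvTkStep (tokens ++ [cur ++ p], cur ++ p ++ ['/'])).1 = _
    rw [ih]
    rw [List.length_cons, List.range_succ_eq_map, List.map_cons, List.map_map]
    simp only [List.take_succ_cons, List.take_zero, PySem.Chars.join_singleton,
      List.append_assoc, List.singleton_append]
    congr 1
    congr 1
    apply List.map_congr_left
    intro i hi
    have hlt : i < ps.length := List.mem_range.mp hi
    simp only [Function.comp_apply, Nat.succ_eq_add_one]
    have hne : ps.take (i + 1) ≠ [] := by
      cases ps with
      | nil => simp at hlt
      | cons q t => simp
    obtain ⟨q, t, hqt⟩ := List.exists_cons_of_ne_nil hne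
    rw [hqt, PySem.Chars.join_cons_cons]
    simp

-- ===== VERDICT (by name: the statement is the Claim_ definition above) =====
theorem taxonomy_tokenizer_spec : Claim_equal_taxonomy_tokenizer := by
  intro text _
  unfold Spec_taxonomy_tokenizer taxonomy_tokenizer taxonomy_tokenizer_alt
  by_cases h : text = ""
  · simp [h]
  · simp only [h, ite_false]
    rw [pvFold_eq]
    simp
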